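-- pv_equiv track=rewrite | github.com/yongeclub/hangman | hangman.py | guess_next_letter
-- ===== SOURCE A (Python) =====
-- def guess_next_letter(pattern, used_letters=[], word_list=[]):
--     result = None
--     letters = {}
--     for word in word_list:
--         for l in word:
--             if l not in letters:
--                 letters[l] = 1
--             else:
--                 letters[l] += 1
--     letters = sorted(letters.items(), key=lambda x:x[1], reverse=True)
--
--     for x in letters:
--         if x[0] not in used_letters:
--             result = x[0]
--             break
--     return result
-- ===== SOURCE B (Python) =====
-- def guess_next_letter(pattern, used_letters=[], word_list=[]):
--     counts = {}
--     for word in word_list: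
--         for l in word:
--             counts[l] = counts.get(l, 0) + 1
--     best = None
--     best_count = 0
--     for letter, count in counts.items():
--         if letter not in used_letters and (best is None or count > best_count):
--             best, best_count = letter, count
--     return best
-- ===== Notes on version B (the rewrite author's own statement) =====
-- stated objective: simpler
-- what changed: replaces the sort-then-pick (stable descending sort of the letter counts followed by a first-unused scan) with a single linear argmax pass over the counter in insertion order, adopting an unused letter only on a strictly greater count
import Mathlib
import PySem

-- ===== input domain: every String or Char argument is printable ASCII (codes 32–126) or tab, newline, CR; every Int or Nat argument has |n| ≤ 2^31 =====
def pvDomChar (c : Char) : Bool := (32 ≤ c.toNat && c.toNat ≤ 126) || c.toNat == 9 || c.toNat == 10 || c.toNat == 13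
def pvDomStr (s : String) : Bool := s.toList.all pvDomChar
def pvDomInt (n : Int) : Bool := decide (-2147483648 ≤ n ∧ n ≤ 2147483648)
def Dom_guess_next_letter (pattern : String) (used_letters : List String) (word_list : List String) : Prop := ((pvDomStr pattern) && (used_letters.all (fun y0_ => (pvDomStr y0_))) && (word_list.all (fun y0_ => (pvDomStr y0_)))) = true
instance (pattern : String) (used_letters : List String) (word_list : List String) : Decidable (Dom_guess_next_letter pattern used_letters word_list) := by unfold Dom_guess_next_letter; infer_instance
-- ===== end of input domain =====

-- B replaces A's sort-then-pick with one linear argmax pass over the counter (strict '>' keeps the stable-sort tie-breaking); objective: simpler.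

-- ===== PORT A =====
-- the 'for x in letters: if …: result = x[0]; break' loop of A
def pvPickA (used : List String) : List (String × Int) → Option String
  | [] => none
  | x :: rest => if used.contains x.1 then pvPickA used rest else some x.1

def guess_next_letter (pattern : String) (used_letters : List String) (word_list : List String) : Option String :=
  let letters : PySem.Dict String Int :=
    word_list.foldl (fun d word =>
      word.toList.foldl (fun d l =>
        if d.contains l.toString = false then d.insert l.toString 1
        else d.insert l.toString (d.getD l.toString 0 + 1)) d) PySem.Dict.empty
  pvPickA used_letters (PySem.List.sorted letters.items (fun x => x.2) true)

-- ===== PORT B =====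
-- one step of B's argmax loop over the counter items
def pvStepB (used : List String) (st : Option String × Int) (p : String × Int) : Option String × Int :=
  if used.contains p.1 then st
  else if st.1.isNone || st.2 < p.2 then (some p.1, p.2) else st

def guess_next_letter_alt (pattern : String) (used_letters : List String) (word_list : List String) : Option String :=
  let counts : PySem.Dict String Int :=
    word_list.foldl (fun d word =>
      word.toList.foldl (fun d l => d.insert l.toString (d.getD l.toString 0 + 1)) d) PySem.Dict.empty
  (counts.items.foldl (pvStepB used_letters) (none, 0)).1

-- ===== PRECONDITION & SPEC =====
def Spec_guess_next_letter (pattern : String) (used_letters : List String) (word_list : List String) (out : Option String) : Prop := out = guess_next_letter_alt pattern used_letters word_list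
instance (pattern : String) (used_letters : List String) (word_list : List String) (out : Option String) : Decidable (Spec_guess_next_letter pattern used_letters word_list out) := by unfold Spec_guess_next_letter; infer_instance

-- ===== CLAIM (what is proved, stated in full; the proofs are below) =====
def Claim_equal_guess_next_letter : Prop := ∀ (pattern : String) (used_letters : List String) (word_list : List String), Dom_guess_next_letter pattern used_letters word_list → Spec_guess_next_letter pattern used_letters word_list (guess_next_letter pattern used_letters word_list)

-- ===== LEMMAS AND PROOFS =====

theorem count_step_eq :
    (fun (d : PySem.Dict String Int) (l : Char) =>
        if d.contains l.toString = false then d.insert l.toString 1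
        else d.insert l.toString (d.getD l.toString 0 + 1)) =
    (fun (d : PySem.Dict String Int) (l : Char) => d.insert l.toString (d.getD l.toString 0 + 1)) := by
  funext d l
  split_ifs with h
  · have h0 : d.getD l.toString 0 = 0 := by
      have := (PySem.Dict.get?_eq_none_iff_contains d l.toString).2 h
      simp [Char.toString] at this
      simp [PySem.Dict.getD, this]
    rw [h0]; norm_num
  · rfl

theorem insertBy_eq_tw_dw {α : Type} (b : α → α → Bool) (x : α) (ys : List α) :
    PySem.List.insertBy b x ys =
      ys.takeWhile (fun y => !b x y) ++ x :: ys.dropWhile (fun y => !b x y) := by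
  induction ys with
  | nil => rfl
  | cons y t ih =>
    by_cases h : b x y
    · simp [PySem.List.insertBy, h, List.dropWhile_cons]
    · simp [PySem.List.insertBy, h, List.dropWhile_cons, ih]

theorem insertBy_append_left {α : Type} (b : α → α → Bool) (x : α) (pre rest : List α)
    (h : ∀ y ∈ pre, b x y = false) :
    PySem.List.insertBy b x (pre ++ rest) = pre ++ PySem.List.insertBy b x rest := by
  induction pre with
  | nil => rfl
  | cons y t ih =>
    have hy : b x y = false := h y (by simp)
    simp [PySem.List.insertBy, hy, ih (fun z hz => h z (by simp [hz]))]

theorem pick_append_used (used : List String) (S₁ rest : List (String × Int))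
    (h : ∀ q ∈ S₁, used.contains q.1 = true) :
    pvPickA used (S₁ ++ rest) = pvPickA used rest := by
  induction S₁ with
  | nil => rfl
  | cons q t ih =>
    have hq : q.1 ∈ used := by simpa using h q (by simp)
    simp [pvPickA, hq, ih (fun z hz => h z (by simp [hz]))]

def pvBfr (a b : String × Int) : Bool := decide (b.2 < a.2)

theorem sorted_append_one (L : List (String × Int)) (x : String × Int) :
    PySem.List.sorted (L ++ [x]) (fun p => p.2) true =
      PySem.List.insertBy pvBfr x (PySem.List.sorted L (fun p => p.2) true) := by
  simp only [PySem.List.sorted_rev_eq_foldl_insertBy, List.foldl_append]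
  rfl

theorem insertBy_mid {α : Type} (b : α → α → Bool) (x p : α) (S₁ S₂ : List α) (hbp : b x p = true) :
    ∃ T₁ T₂, S₁ = T₁ ++ T₂ ∧
      PySem.List.insertBy b x (S₁ ++ p :: S₂) = T₁ ++ x :: (T₂ ++ p :: S₂) := by
  induction S₁ with
  | nil => exact ⟨[], [], rfl, by simp [PySem.List.insertBy, hbp]⟩
  | cons y t ih =>
    by_cases hy : b x y
    · exact ⟨[], y :: t, rfl, by simp [PySem.List.insertBy, hy]⟩
    · obtain ⟨T₁, T₂, ht, hins⟩ := ih
      refine ⟨y :: T₁, T₂, by rw [ht, List.cons_append], ?_⟩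
      rw [List.cons_append]
      simp [PySem.List.insertBy, hy, hins]

def InvB (used : List String) (L : List (String × Int)) (st : Option String × Int) : Prop :=
  match st.1 with
  | none => ∀ p ∈ L, used.contains p.1 = true
  | some l => (∀ q ∈ L, used.contains q.1 = false → q.2 ≤ st.2) ∧
      ∃ S₁ p S₂, PySem.List.sorted L (fun p => p.2) true = S₁ ++ p :: S₂ ∧
        (∀ q ∈ S₁, used.contains q.1 = true) ∧ used.contains p.1 = false ∧ p.1 = l ∧ p.2 = st.2

theorem inv_step (used : List String) (L : List (String × Int)) (st : Option String × Int)
    (h : InvB used L st) (x : String × Int) :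
    InvB used (L ++ [x]) (pvStepB used st x) := by
  by_cases hx : used.contains x.1 = true
  · -- x is used: state unchanged
    have hxm : x.1 ∈ used := by simpa using hx
    have hstep : pvStepB used st x = st := by simp [pvStepB, hxm]
    rw [hstep]
    cases hst : st.1 with
    | none =>
      unfold InvB at h ⊢
      rw [hst] at h ⊢
      intro p hp
      rcases List.mem_append.1 hp with hp | hp
      · exact h p hp
      · simp at hp; subst hp; exact hx
    | some l =>
      unfold InvB at h ⊢
      rw [hst] at h ⊢
      obtain ⟨hmax, S₁, p, S₂, hS, hS₁, hp, hpl, hpc⟩ := h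
      refine ⟨?_, ?_⟩
      · intro q hq hqu
        rcases List.mem_append.1 hq with hq | hq
        · exact hmax q hq hqu
        · simp at hq; subst hq; rw [hx] at hqu; exact absurd hqu (by simp)
      · rw [sorted_append_one, hS]
        by_cases hlt : p.2 < x.2
        · have hbp : pvBfr x p = true := by
            simp [pvBfr, hlt]
          obtain ⟨T₁, T₂, ht, hins⟩ :=
            insertBy_mid pvBfr x p S₁ S₂ hbp
          refine ⟨T₁ ++ x :: T₂, p, S₂, by rw [hins]; simp, ?_, hp, hpl, hpc⟩
          intro q hq
          rcases List.mem_append.1 hq with hq | hq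
          · exact hS₁ q (by rw [ht]; exact List.mem_append.2 (Or.inl hq))
          · rcases List.mem_cons.1 hq with hq | hq
            · subst hq; exact hx
            · exact hS₁ q (by rw [ht]; exact List.mem_append.2 (Or.inr hq))
        · -- x.2 ≤ p.2 : x goes past S₁ and p
          have hpw := PySem.List.sorted_pairwise_rev L (fun p => p.2)
          rw [hS] at hpw
          have hS₁p : ∀ y ∈ S₁ ++ [p], pvBfr x y = false := by
            intro y hy
            rcases List.mem_append.1 hy with hy | hy
            · have hyp : p.2 ≤ y.2 := by
                have := (List.pairwise_append.1 hpw).2.2 y hy p (by simp)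
                exact this
              simp [pvBfr]; omega
            · simp at hy; subst hy; simp [pvBfr]; omega
          have : PySem.List.insertBy pvBfr x ((S₁ ++ [p]) ++ S₂) =
              (S₁ ++ [p]) ++ PySem.List.insertBy pvBfr x S₂ :=
            insertBy_append_left _ x (S₁ ++ [p]) S₂ hS₁p
          rw [List.append_assoc, List.singleton_append] at this
          refine ⟨S₁, p, PySem.List.insertBy pvBfr x S₂, ?_, hS₁, hp, hpl, hpc⟩
          rw [this]
          simp
  · -- x unused
    have hx' : used.contains x.1 = false := by simp at hx ⊢; simpa using hx
    cases hst : st.1 with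
    | none =>
      unfold InvB at h
      rw [hst] at h
      have hxm : x.1 ∉ used := by simpa using hx'
      have hstep : pvStepB used st x = (some x.1, x.2) := by
        simp [pvStepB, hxm, hst]
      rw [hstep]
      unfold InvB
      refine ⟨?_, ?_⟩
      · intro q hq hqu
        rcases List.mem_append.1 hq with hq | hq
        · exact absurd (h q hq) (by rw [hqu]; simp)
        · simp at hq; subst hq; omega
      · rw [sorted_append_one]
        rw [insertBy_eq_tw_dw]
        refine ⟨_, x, _, rfl, ?_, hx', rfl, rfl⟩
        intro q hq
        have hqS : q ∈ PySem.List.sorted L (fun p => p.2) true :=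
          (List.takeWhile_sublist _).mem hq
        exact h q ((PySem.List.mem_sorted _ _ _ _).1 hqS)
    | some l =>
      unfold InvB at h
      rw [hst] at h
      obtain ⟨hmax, S₁, p, S₂, hS, hS₁, hp, hpl, hpc⟩ := h
      by_cases hadopt : st.2 < x.2
      · have hxm : x.1 ∉ used := by simpa using hx'
        have hstep : pvStepB used st x = (some x.1, x.2) := by
          simp [pvStepB, hxm, hadopt]
        rw [hstep]
        unfold InvB
        refine ⟨?_, ?_⟩
        · intro q hq hqu
          rcases List.mem_append.1 hq with hq | hq
          · have := hmax q hq hqu; omega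
          · simp at hq; subst hq; omega
        · rw [sorted_append_one, hS]
          have hlt : p.2 < x.2 := by omega
          have hbp : pvBfr x p = true := by
            simp [pvBfr, hlt]
          obtain ⟨T₁, T₂, ht, hins⟩ :=
            insertBy_mid pvBfr x p S₁ S₂ hbp
          refine ⟨T₁, x, T₂ ++ p :: S₂, by rw [hins], ?_, hx', rfl, rfl⟩
          intro q hq
          exact hS₁ q (by rw [ht]; exact List.mem_append.2 (Or.inl hq))
      · have hstep : pvStepB used st x = st := by
          simp [pvStepB, hx', hst, hadopt]
        rw [hstep]
        unfold InvB
        rw [hst]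
        refine ⟨?_, ?_⟩
        · intro q hq hqu
          rcases List.mem_append.1 hq with hq | hq
          · exact hmax q hq hqu
          · simp at hq; subst hq; omega
        · rw [sorted_append_one, hS]
          have hpw := PySem.List.sorted_pairwise_rev L (fun p => p.2)
          rw [hS] at hpw
          have hS₁p : ∀ y ∈ S₁ ++ [p], pvBfr x y = false := by
            intro y hy
            rcases List.mem_append.1 hy with hy | hy
            · have hyp : p.2 ≤ y.2 := (List.pairwise_append.1 hpw).2.2 y hy p (by simp)
              simp [pvBfr]; omega
            · simp at hy; subst hy; simp [pvBfr]; omega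
          have heq : PySem.List.insertBy pvBfr x ((S₁ ++ [p]) ++ S₂) =
              (S₁ ++ [p]) ++ PySem.List.insertBy pvBfr x S₂ :=
            insertBy_append_left _ x (S₁ ++ [p]) S₂ hS₁p
          rw [List.append_assoc, List.singleton_append] at heq
          refine ⟨S₁, p, PySem.List.insertBy pvBfr x S₂, ?_, hS₁, hp, hpl, hpc⟩
          rw [heq]
          simp

theorem inv_pick (used : List String) (L : List (String × Int)) (st : Option String × Int)
    (h : InvB used L st) :
    pvPickA used (PySem.List.sorted L (fun p => p.2) true) = st.1 := by
  cases hst : st.1 with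
  | none =>
    unfold InvB at h; rw [hst] at h
    have hall : ∀ q ∈ PySem.List.sorted L (fun p => p.2) true, used.contains q.1 = true :=
      fun q hq => h q ((PySem.List.mem_sorted _ _ _ _).1 hq)
    have := pick_append_used used (PySem.List.sorted L (fun p => p.2) true) [] hall
    simpa [pvPickA] using this
  | some l =>
    unfold InvB at h; rw [hst] at h
    obtain ⟨hmax, S₁, p, S₂, hS, hS₁, hp, hpl, hpc⟩ := h
    rw [hS, pick_append_used used S₁ _ hS₁]
    have hp' : p.1 ∉ used := by simpa using hp
    have : pvPickA used (p :: S₂) = some p.1 := by simp [pvPickA, hp']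
    rw [this, hpl]

theorem pick_eq (used : List String) (L : List (String × Int)) :
    pvPickA used (PySem.List.sorted L (fun p => p.2) true) = (L.foldl (pvStepB used) (none, 0)).1 := by
  have haux : ∀ M : List (String × Int), InvB used M (M.foldl (pvStepB used) (none, 0)) := by
    intro M
    induction M using List.reverseRecOn with
    | nil => simp [InvB]
    | append_singleton t x ih =>
      rw [List.foldl_append]
      exact inv_step used t _ ih x
  exact inv_pick used L _ (haux L)

-- ===== VERDICT (by name: the statement is the Claim_ definition above) =====
theorem guess_next_letter_spec : Claim_equal_guess_next_letter := by
  intro pattern used_letters word_list _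
  unfold Spec_guess_next_letter guess_next_letter guess_next_letter_alt
  rw [count_step_eq]
  exact pick_eq used_letters _
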